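-- pv_equiv track=rewrite | github.com/markbroich/coding_challenges_example_solutions | coding_challenges_example_solutions/minimizingpermutations/minimizingpermutations.py | pop_graph
-- ===== SOURCE A (Python) =====
-- def pop_graph(myTup):
--     # populate graph
--     G = {}
--     seen = set()
--     # use a BFS to populate the graph
--     queue = [myTup]
--     while queue:
--         curTup = queue.pop(0)
--         if curTup not in seen:
--             seen.add((curTup))
--             # get start end indices of possible permutations of curTup
--             # returns a Lst of tup
--             permLst = get_perm_indices(curTup)
--             # create the swaps as per permLst
--             # returns a Lst of swap results
--             edgeLst = create_edges(curTup, permLst)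
--             G[curTup] = edgeLst
--             queue = queue + edgeLst
--     return G
--
-- def get_perm_indices(curTup):
--     # get start end indices of possible permutations of curTup
--     # returns a Lst of tup
--     idxLst = [i for i in range(0, len(curTup))]
--     permLst = []
--
--     def rec(pre, post):
--         if pre and len(pre) == 2:
--             permLst.append((pre[0], pre[1]))
--             return
--         if not pre:
--             for i in range(0, len(post)):
--                 rec(pre + [post[i]], post[:i] + post[i+1:])
--         else:
--             for i in range(pre[0], len(post)):
--                 rec(pre + [post[i]], post[:i] + post[i+1:])
--     rec([], idxLst)
--     return permLst
--
-- def create_edges(curTup, permLst):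
--     # create the swaps as per permLst
--     # returns a Lst of swap results
--     edgeLst = []
--     for s, e in permLst:
--         arr = list(curTup)
--         temp = arr[s:e+1]
--         temp = temp[::-1]
--         arr[s:e+1] = temp
--         edgeLst.append(tuple(arr))
--     return edgeLst
-- ===== SOURCE B (Python) =====
-- def pop_graph(myTup):
--     # populate the reversal graph: scan the growing worklist with an index
--     # pointer (no pop(0)/queue copies), keys of G double as the seen-set, and
--     # each node's edges come from a direct (s, e) double loop instead of a
--     # recursive index generator plus a separate edge-building pass.
--     G = {}
--     queue = [myTup]
--     i = 0
--     while i < len(queue):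
--         cur = queue[i]
--         i += 1
--         if cur in G:
--             continue
--         edges = [cur[:s] + cur[s:e + 1][::-1] + cur[e + 1:]
--                  for s in range(len(cur)) for e in range(s + 1, len(cur))]
--         G[cur] = edges
--         queue.extend(edges)
--     return G
-- ===== Notes on version B (the rewrite author's own statement) =====
-- stated objective: simpler
-- what changed: B drops A's recursive (s,e)-index generator, the separate create_edges pass and the seen-set, building each node's edge list with one direct (s,e) double loop and scanning the worklist with an index pointer instead of pop(0)/queue-copy, with the dict's keys doubling as the seen-set.
import Mathlib
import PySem

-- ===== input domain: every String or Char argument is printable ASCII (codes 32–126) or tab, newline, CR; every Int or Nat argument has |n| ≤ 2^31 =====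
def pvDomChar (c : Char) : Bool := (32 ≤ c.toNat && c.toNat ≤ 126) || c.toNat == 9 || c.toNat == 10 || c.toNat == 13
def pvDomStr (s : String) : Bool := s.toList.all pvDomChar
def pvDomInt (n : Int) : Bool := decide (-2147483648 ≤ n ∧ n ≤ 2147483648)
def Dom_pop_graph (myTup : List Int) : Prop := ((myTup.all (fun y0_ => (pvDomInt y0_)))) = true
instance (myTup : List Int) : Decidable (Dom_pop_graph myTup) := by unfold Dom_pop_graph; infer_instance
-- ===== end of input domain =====

-- B replaces A's recursive index generator + separate edge pass + seen-set + pop(0) BFS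
-- by an index-pointer scan over the worklist whose dict keys double as the seen-set,
-- with each node's edge list built by a direct (s, e) double loop (objective: simpler; also avoids the O(k) worklist copies, speed unmeasured).

-- ===== PORT A =====
-- the inner 'rec' of get_perm_indices; the shared permLst becomes the accumulator.
-- fuel is only a termination guard: pre grows by one element per call and the
-- function stops at len(pre) == 2, so the recursion depth is at most 3.
def popGraphRecA : Nat → List Int → List Int → List (Int × Int) → List (Int × Int)
  | 0, _, _, acc => acc
  | fuel + 1, pre, post, acc =>
    if pre ≠ [] ∧ pre.length = 2 then
      acc ++ [(PySem.List.pyGetD pre 0 0, PySem.List.pyGetD pre 1 0)]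
    else if pre = [] then
      (PySem.List.pyRange 0 (post.length : Int) 1).foldl
        (fun acc i => popGraphRecA fuel (pre ++ [PySem.List.pyGetD post i 0])
          (PySem.List.slice post none (some i) ++ PySem.List.slice post (some (i + 1)) none) acc) acc
    else
      (PySem.List.pyRange (PySem.List.pyGetD pre 0 0) (post.length : Int) 1).foldl
        (fun acc i => popGraphRecA fuel (pre ++ [PySem.List.pyGetD post i 0])
          (PySem.List.slice post none (some i) ++ PySem.List.slice post (some (i + 1)) none) acc) acc

def get_perm_indices (curTup : List Int) : List (Int × Int) :=
  popGraphRecA 3 [] (PySem.List.pyRange 0 (curTup.length : Int) 1) []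

def create_edges (curTup : List Int) (permLst : List (Int × Int)) : List (List Int) :=
  permLst.foldl (fun edgeLst p =>
    let arr := curTup
    let temp := PySem.List.slice arr (some p.1) (some (p.2 + 1))
    let temp := (PySem.List.slice? temp none none (-1)).getD []
    -- arr[s:e+1] = temp hand-ported as arr[:s] ++ temp ++ arr[e+1:]
    -- (exact for the pairs this program produces: 0 ≤ s < e < len arr)
    let arr := PySem.List.slice arr none (some p.1) ++ temp ++ PySem.List.slice arr (some (p.2 + 1)) none
    edgeLst ++ [arr]) []

-- fuel upper-bounds the loop iterations: at most 1 + n! * n(n-1)/2 tuples are ever enqueued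
def popGraphFuel (n : Nat) : Nat := Nat.factorial n * (n * n) + 1

def popGraphLoopA : Nat → PySem.Dict (List Int) (List (List Int)) → PySem.Set (List Int) →
    List (List Int) → PySem.Dict (List Int) (List (List Int))
  | 0, G, _, _ => G
  | fuel + 1, G, seen, queue =>
    match queue with
    | [] => G
    | curTup :: rest =>
      if PySem.Set.contains seen curTup then popGraphLoopA fuel G seen rest
      else
        let seen := PySem.Set.add seen curTup
        let permLst := get_perm_indices curTup
        let edgeLst := create_edges curTup permLst
        let G := G.insert curTup edgeLst
        popGraphLoopA fuel G seen (rest ++ edgeLst)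

def pop_graph (myTup : List Int) : List (List Int × List (List Int)) :=
  (popGraphLoopA (popGraphFuel myTup.length) PySem.Dict.empty PySem.Set.empty [myTup]).items

-- ===== PORT B =====
-- the (s, e) double-loop comprehension of Source B
def popGraphEdgesB (cur : List Int) : List (List Int) :=
  (PySem.List.pyRange 0 (cur.length : Int) 1).flatMap (fun s =>
    (PySem.List.pyRange (s + 1) (cur.length : Int) 1).map (fun e =>
      PySem.List.slice cur none (some s)
        ++ (PySem.List.slice? (PySem.List.slice cur (some s) (some (e + 1))) none none (-1)).getD []
        ++ PySem.List.slice cur (some (e + 1)) none))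

def popGraphLoopB : Nat → PySem.Dict (List Int) (List (List Int)) → List (List Int) → Nat →
    PySem.Dict (List Int) (List (List Int))
  | 0, G, _, _ => G
  | fuel + 1, G, queue, i =>
    if i < queue.length then
      let cur := queue.getD i []
      if G.contains cur then popGraphLoopB fuel G queue (i + 1)
      else
        let edges := popGraphEdgesB cur
        popGraphLoopB fuel (G.insert cur edges) (queue ++ edges) (i + 1)
    else G

def pop_graph_alt (myTup : List Int) : List (List Int × List (List Int)) :=
  (popGraphLoopB (popGraphFuel myTup.length) PySem.Dict.empty [myTup] 0).items

-- ===== PRECONDITION & SPEC =====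
def Spec_pop_graph (myTup : List Int) (out : List (List Int × List (List Int))) : Prop := out = pop_graph_alt myTup
instance (myTup : List Int) (out : List (List Int × List (List Int))) : Decidable (Spec_pop_graph myTup out) := by unfold Spec_pop_graph; infer_instance

-- ===== CLAIM (what is proved, stated in full; the proofs are below) =====
def Claim_equal_pop_graph : Prop := ∀ (myTup : List Int), Dom_pop_graph myTup → Spec_pop_graph myTup (pop_graph myTup)

-- ===== LEMMAS AND PROOFS =====

lemma recA_pair (i x : Int) (q : List Int) (acc : List (Int × Int)) :
    popGraphRecA 1 [i, x] q acc = acc ++ [(i, x)] := by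
  simp [popGraphRecA, PySem.List.pyGetD, PySem.List.pyGet?, PySem.List.pyIdx?]

lemma map_pair (i : Int) (n : Nat) :
    (PySem.List.pyRange i ((n : Int) - 1) 1).map (fun j => (i, j + 1))
      = (PySem.List.pyRange (i + 1) (n : Int) 1).map (fun e => (i, e)) := by
  rw [PySem.List.pyRange_one, PySem.List.pyRange_one, List.map_map, List.map_map]
  have h : ((n : Int) - 1 - i).toNat = ((n : Int) - (i + 1)).toNat := by omega
  rw [h]
  apply List.map_congr_left
  intro k _
  simp [Function.comp]
  ring_nf

lemma getD_q (i j : Int) (n : Nat) (h0 : 0 ≤ i) (hij : i ≤ j) (hj : j < (n : Int) - 1) :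
    PySem.List.pyGetD (PySem.List.pyRange 0 i 1 ++ PySem.List.pyRange (i + 1) (n : Int) 1) j 0 = j + 1 := by
  rw [PySem.List.pyGetD_of_nonneg _ _ (by omega)]
  rw [List.getD_append_right _ _ _ _ (by simp [PySem.List.length_pyRange_one]; omega)]
  rw [List.getD_eq_getElem _ _ (by simp [PySem.List.length_pyRange_one]; omega)]
  rw [PySem.List.getElem_pyRange_one]
  simp [PySem.List.length_pyRange_one]
  omega

lemma getD_range (i : Int) (n : Nat) (h0 : 0 ≤ i) (hn : i < (n : Int)) :
    PySem.List.pyGetD (PySem.List.pyRange 0 (n : Int) 1) i 0 = i := by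
  rw [PySem.List.pyGetD_of_nonneg _ _ h0]
  rw [List.getD_eq_getElem _ _ (by simp [PySem.List.length_pyRange_one]; omega)]
  rw [PySem.List.getElem_pyRange_one]
  omega

lemma slice_take (i : Int) (n : Nat) (h0 : 0 ≤ i) (hn : i ≤ (n : Int)) :
    PySem.List.slice (PySem.List.pyRange 0 (n : Int) 1) none (some i) = PySem.List.pyRange 0 i 1 := by
  rw [PySem.List.slice_to _ h0]
  rw [PySem.List.pyRange_one_append 0 i (n : Int) h0 hn]
  rw [List.take_left' (by simp [PySem.List.length_pyRange_one])]

lemma slice_drop (i : Int) (n : Nat) (h0 : 0 ≤ i) (hn : i ≤ (n : Int)) :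
    PySem.List.slice (PySem.List.pyRange 0 (n : Int) 1) (some i) none = PySem.List.pyRange i (n : Int) 1 := by
  rw [PySem.List.slice_from _ h0]
  rw [PySem.List.pyRange_one_append 0 i (n : Int) h0 hn]
  rw [List.drop_left' (by simp [PySem.List.length_pyRange_one])]

lemma recA_one (i : Int) (n : Nat) (h0 : 0 ≤ i) (hn : i < (n : Int)) (acc : List (Int × Int)) :
    popGraphRecA 2 [i] (PySem.List.pyRange 0 i 1 ++ PySem.List.pyRange (i + 1) (n : Int) 1) acc
      = acc ++ (PySem.List.pyRange (i + 1) (n : Int) 1).map (fun e => (i, e)) := by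
  have hq : (((PySem.List.pyRange 0 i 1 ++ PySem.List.pyRange (i + 1) (n : Int) 1)).length : Int)
      = (n : Int) - 1 := by simp [PySem.List.length_pyRange_one]; omega
  rw [popGraphRecA]
  rw [if_neg (by simp), if_neg (by simp)]
  rw [hq]
  have hget : PySem.List.pyGetD [i] 0 0 = i := by
    simp [PySem.List.pyGetD, PySem.List.pyGet?, PySem.List.pyIdx?]
  rw [hget]
  rw [PySem.List.foldl_congr_mem _ _ (fun acc j => acc ++ [(i, j + 1)]) _ ?_]
  · rw [PySem.List.foldl_append_singleton_eq_map, map_pair]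
  · intro acc' j hj
    obtain ⟨hj1, hj2⟩ := (PySem.List.mem_pyRange_one).1 hj
    rw [getD_q i j n h0 hj1 hj2]
    simpa using recA_pair i (j + 1) _ acc'

lemma get_perm_indices_eq (cur : List Int) :
    get_perm_indices cur =
      (PySem.List.pyRange 0 (cur.length : Int) 1).flatMap (fun s =>
        (PySem.List.pyRange (s + 1) (cur.length : Int) 1).map (fun e => (s, e))) := by
  unfold get_perm_indices
  rw [popGraphRecA]
  rw [if_neg (by simp), if_pos rfl]
  have hlen : ((PySem.List.pyRange 0 (cur.length : Int) 1).length : Int) = (cur.length : Int) := by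
    simp [PySem.List.length_pyRange_one]
  rw [hlen]
  rw [PySem.List.foldl_congr_mem _ _
      (fun acc s => acc ++ (PySem.List.pyRange (s + 1) (cur.length : Int) 1).map (fun e => (s, e))) _ ?_]
  · rw [PySem.List.foldl_append_eq_flatMap]; rfl
  · intro acc s hs
    obtain ⟨hs1, hs2⟩ := (PySem.List.mem_pyRange_one).1 hs
    rw [getD_range s cur.length hs1 hs2]
    rw [slice_take s cur.length hs1 (le_of_lt hs2)]
    rw [slice_drop (s + 1) cur.length (by omega) (by omega)]
    simpa using recA_one s cur.length hs1 hs2 acc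

lemma edges_eq (cur : List Int) :
    create_edges cur (get_perm_indices cur) = popGraphEdgesB cur := by
  rw [get_perm_indices_eq]
  simp only [create_edges, popGraphEdgesB]
  rw [PySem.List.foldl_append_singleton_eq_map (f := fun p : Int × Int =>
    PySem.List.slice cur none (some p.1)
      ++ (PySem.List.slice? (PySem.List.slice cur (some p.1) (some (p.2 + 1))) none none (-1)).getD []
      ++ PySem.List.slice cur (some (p.2 + 1)) none)]
  rw [List.map_flatMap]
  simp only [List.nil_append, List.map_map]
  rfl


lemma contains_keys (G : PySem.Dict (List Int) (List (List Int))) (x : List Int) :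
    PySem.Set.contains (PySem.Dict.keys G) x = PySem.Dict.contains G x := by
  rw [PySem.Set.contains_eq_listContains, PySem.Dict.contains_eq_decide_mem_keys,
    List.contains_eq_mem]

lemma loop_eq (fuel : Nat) :
    ∀ (G : PySem.Dict (List Int) (List (List Int))) (queue : List (List Int)) (i : Nat),
      i ≤ queue.length →
      popGraphLoopA fuel G (PySem.Dict.keys G) (queue.drop i) = popGraphLoopB fuel G queue i := by
  induction fuel with
  | zero => intro G queue i _; rfl
  | succ fuel ih =>
    intro G queue i hi
    by_cases hlt : i < queue.length
    · rw [List.drop_eq_getElem_cons hlt]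
      rw [popGraphLoopA, popGraphLoopB]
      rw [if_pos hlt, List.getD_eq_getElem _ _ hlt]
      rw [contains_keys]
      by_cases hc : PySem.Dict.contains G queue[i] = true
      · rw [if_pos hc]
        simp only [hc, if_true]
        exact ih G queue (i + 1) hlt
      · rw [if_neg hc]
        have hcf : PySem.Dict.contains G queue[i] = false := by
          simpa using hc
        simp only [hcf, Bool.false_eq_true, if_false]
        have hnm : queue[i] ∉ PySem.Dict.keys G := by
          rw [PySem.Dict.contains_eq_decide_mem_keys] at hcf
          simpa using hcf
        rw [PySem.Set.add_of_not_mem hnm]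
        rw [edges_eq]
        rw [← PySem.Dict.keys_insert_of_not_contains G (popGraphEdgesB queue[i]) hcf]
        have hq : queue.drop (i + 1) ++ popGraphEdgesB queue[i]
            = (queue ++ popGraphEdgesB queue[i]).drop (i + 1) := by
          rw [List.drop_append_of_le_length hlt]
        rw [hq]
        exact ih _ _ (i + 1) (by simp; omega)
    · rw [List.drop_eq_nil_of_le (by omega)]
      rw [popGraphLoopA, popGraphLoopB, if_neg hlt]

-- ===== VERDICT (by name: the statement is the Claim_ definition above) =====
theorem pop_graph_spec : Claim_equal_pop_graph := by
  intro myTup _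
  show _ = _
  unfold pop_graph pop_graph_alt
  have h := loop_eq (popGraphFuel myTup.length) PySem.Dict.empty [myTup] 0 (by simp)
  simpa using congrArg PySem.Dict.items h
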